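-- pv_equiv track=rewrite | github.com/daniel-reich/turbo-robot | Ygt4LGupxDAqXNrhS_5.py | spotlight_map
-- ===== SOURCE A (Python) =====
-- def spotlight_map(grid):
--     rows, cols = len(grid), 0
--     if rows > 0:
--         cols = len(grid[0])
--     if rows < 2 and cols < 2:
--         return grid
--     res = [[0] * cols for _ in range(rows)]
--     for r in range(rows):
--         for c in range(cols):
--             for v, h in [(0, 0), (1, 0), (0, 1), (-1, 0), (0, -1), (1, 1),
--                          (-1, -1), (-1, 1), (1, -1)]:
--                 if 0 <= r + v < rows and 0 <= c + h < cols: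
--                     res[r][c] += grid[r + v][c + h]
--     return res
-- ===== SOURCE B (Python) =====
-- def spotlight_map(grid):
--     rows = len(grid)
--     cols = len(grid[0]) if rows else 0
--     if rows < 2 and cols < 2:
--         return grid
--     # separable filter: horizontal 3-sums per row, then vertical 3-sums of those
--     H = []
--     for row in grid:
--         H.append([(row[c - 1] if c > 0 else 0) + row[c]
--                   + (row[c + 1] if c + 1 < cols else 0)
--                   for c in range(cols)])
--     res = []
--     for r in range(rows):
--         res.append([(H[r - 1][c] if r > 0 else 0) + H[r][c]
--                     + (H[r + 1][c] if r + 1 < rows else 0)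
--                     for c in range(cols)])
--     return res
-- ===== Notes on version B (the rewrite author's own statement) =====
-- stated objective: faster
-- what changed: B replaces A's per-cell scan over the 9 neighbourhood offsets by a separable two-pass filter: first horizontal 3-sums per row, then vertical 3-sums of those, so each cell needs at most 3+3 guarded additions instead of 9 offset bound checks.
import Mathlib
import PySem

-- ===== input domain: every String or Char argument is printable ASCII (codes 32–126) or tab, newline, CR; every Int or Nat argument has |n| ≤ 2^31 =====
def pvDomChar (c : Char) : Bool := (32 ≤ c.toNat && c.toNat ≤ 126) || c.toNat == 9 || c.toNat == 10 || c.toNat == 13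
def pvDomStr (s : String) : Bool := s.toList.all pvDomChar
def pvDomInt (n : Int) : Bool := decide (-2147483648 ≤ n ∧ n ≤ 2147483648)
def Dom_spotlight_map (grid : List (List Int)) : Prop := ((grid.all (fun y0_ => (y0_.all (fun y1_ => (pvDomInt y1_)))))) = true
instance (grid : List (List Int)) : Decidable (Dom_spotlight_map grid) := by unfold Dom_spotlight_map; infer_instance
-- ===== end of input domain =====

-- B replaces A's 9-offset neighbourhood scan per cell by a separable filter (horizontal
-- 3-sums per row, then vertical 3-sums of those): a different two-pass decomposition.

-- ===== PORT A =====
def pvOffsets : List (Int × Int) :=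
  [(0,0),(1,0),(0,1),(-1,0),(0,-1),(1,1),(-1,-1),(-1,1),(1,-1)]

def spotlight_map (grid : List (List Int)) : List (List Int) :=
  let rows : Int := grid.length
  let cols : Int := match grid with | [] => 0 | g0 :: _ => (g0.length : Int)
  if rows < 2 ∧ cols < 2 then grid
  else
    (PySem.List.pyRange 0 rows).map fun r =>
      (PySem.List.pyRange 0 cols).map fun c =>
        pvOffsets.foldl (fun acc vh =>
          if 0 ≤ r + vh.1 ∧ r + vh.1 < rows ∧ 0 ≤ c + vh.2 ∧ c + vh.2 < cols then
            acc + PySem.List.pyGetD (PySem.List.pyGetD grid (r + vh.1) []) (c + vh.2) 0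
          else acc) 0

-- ===== PORT B =====
-- the horizontal 3-sum row of B (its first pass, kept as a named helper)
def pvHrow (cols : Int) (row : List Int) : List Int :=
  (PySem.List.pyRange 0 cols).map fun c =>
    (if 0 < c then PySem.List.pyGetD row (c - 1) 0 else 0) +
    PySem.List.pyGetD row c 0 +
    (if c + 1 < cols then PySem.List.pyGetD row (c + 1) 0 else 0)

def spotlight_map_alt (grid : List (List Int)) : List (List Int) :=
  let rows : Int := grid.length
  let cols : Int := match grid with | [] => 0 | g0 :: _ => (g0.length : Int)
  if rows < 2 ∧ cols < 2 then grid
  else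
    let H : List (List Int) := grid.map (pvHrow cols)
    (PySem.List.pyRange 0 rows).map fun r =>
      (PySem.List.pyRange 0 cols).map fun c =>
        (if 0 < r then PySem.List.pyGetD (PySem.List.pyGetD H (r - 1) []) c 0 else 0) +
        PySem.List.pyGetD (PySem.List.pyGetD H r []) c 0 +
        (if r + 1 < rows then PySem.List.pyGetD (PySem.List.pyGetD H (r + 1) []) c 0 else 0)

-- ===== PRECONDITION & SPEC =====
-- Pre_ excludes ragged grids in which some row is shorter than the first row: there the
-- Python A (and the Python B alike) raises IndexError while indexing that short row.
def Pre_spotlight_map (grid : List (List Int)) : Prop :=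
  ∀ row ∈ grid, (grid.headD []).length ≤ row.length
instance (grid : List (List Int)) : Decidable (Pre_spotlight_map grid) := by
  unfold Pre_spotlight_map; infer_instance

def pvWitness_spotlight_map : List (List Int) := [[1, 2], [3, 4]]

def Spec_spotlight_map (grid : List (List Int)) (out : List (List Int)) : Prop := out = spotlight_map_alt grid
instance (grid : List (List Int)) (out : List (List Int)) : Decidable (Spec_spotlight_map grid out) := by unfold Spec_spotlight_map; infer_instance

-- ===== CLAIM (what is proved, stated in full; the proofs are below) =====
def Claim_equal_spotlight_map : Prop := ∀ (grid : List (List Int)), Dom_spotlight_map grid → Pre_spotlight_map grid → Spec_spotlight_map grid (spotlight_map grid)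

-- ===== LEMMAS AND PROOFS =====

-- one cell of A's triple loop equals the separable two-pass value, written out
theorem pvElem_eq (grid : List (List Int)) (rows cols r c : Int)
    (hr0 : 0 ≤ r) (hr1 : r < rows) (hc0 : 0 ≤ c) (hc1 : c < cols) :
    (pvOffsets.foldl (fun acc vh =>
        if 0 ≤ r + vh.1 ∧ r + vh.1 < rows ∧ 0 ≤ c + vh.2 ∧ c + vh.2 < cols then
          acc + PySem.List.pyGetD (PySem.List.pyGetD grid (r + vh.1) []) (c + vh.2) 0
        else acc) 0) =
    (if 0 < r then
        (if 0 < c then PySem.List.pyGetD (PySem.List.pyGetD grid (r-1) []) (c-1) 0 else 0) +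
        PySem.List.pyGetD (PySem.List.pyGetD grid (r-1) []) c 0 +
        (if c + 1 < cols then PySem.List.pyGetD (PySem.List.pyGetD grid (r-1) []) (c+1) 0 else 0)
      else 0) +
    ((if 0 < c then PySem.List.pyGetD (PySem.List.pyGetD grid r []) (c-1) 0 else 0) +
      PySem.List.pyGetD (PySem.List.pyGetD grid r []) c 0 +
      (if c + 1 < cols then PySem.List.pyGetD (PySem.List.pyGetD grid r []) (c+1) 0 else 0)) +
    (if r + 1 < rows then
        (if 0 < c then PySem.List.pyGetD (PySem.List.pyGetD grid (r+1) []) (c-1) 0 else 0) +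
        PySem.List.pyGetD (PySem.List.pyGetD grid (r+1) []) c 0 +
        (if c + 1 < cols then PySem.List.pyGetD (PySem.List.pyGetD grid (r+1) []) (c+1) 0 else 0)
      else 0) := by
  simp only [pvOffsets, List.foldl_cons, List.foldl_nil]
  simp only [add_zero, zero_add, ← sub_eq_add_neg]
  simp only [show (0 ≤ r ∧ r < rows ∧ 0 ≤ c ∧ c < cols) ↔ True by simp; omega,
             show (0 ≤ r+1 ∧ r+1 < rows ∧ 0 ≤ c ∧ c < cols) ↔ (r+1 < rows) by constructor <;> intro h <;> [exact h.2.1; omega],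
             show (0 ≤ r ∧ r < rows ∧ 0 ≤ c+1 ∧ c+1 < cols) ↔ (c+1 < cols) by constructor <;> intro h <;> [exact h.2.2.2; omega],
             show (0 ≤ r-1 ∧ r-1 < rows ∧ 0 ≤ c ∧ c < cols) ↔ (0 < r) by constructor <;> intro h <;> omega,
             show (0 ≤ r ∧ r < rows ∧ 0 ≤ c-1 ∧ c-1 < cols) ↔ (0 < c) by constructor <;> intro h <;> omega,
             show (0 ≤ r+1 ∧ r+1 < rows ∧ 0 ≤ c+1 ∧ c+1 < cols) ↔ (r+1 < rows ∧ c+1 < cols) by constructor <;> intro h <;> [exact ⟨h.2.1, h.2.2.2⟩; omega],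
             show (0 ≤ r-1 ∧ r-1 < rows ∧ 0 ≤ c-1 ∧ c-1 < cols) ↔ (0 < r ∧ 0 < c) by constructor <;> intro h <;> omega,
             show (0 ≤ r-1 ∧ r-1 < rows ∧ 0 ≤ c+1 ∧ c+1 < cols) ↔ (0 < r ∧ c+1 < cols) by constructor <;> intro h <;> omega,
             show (0 ≤ r+1 ∧ r+1 < rows ∧ 0 ≤ c-1 ∧ c-1 < cols) ↔ (r+1 < rows ∧ 0 < c) by constructor <;> intro h <;> omega,
             if_true, ite_and]
  split_ifs <;> omega

-- looking up one cell of pvHrow, for an in-range column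
theorem pvHrow_get (cols : Int) (row : List Int) (c : Int) (hc0 : 0 ≤ c) (hc1 : c < cols) :
    PySem.List.pyGetD (pvHrow cols row) c 0 =
      (if 0 < c then PySem.List.pyGetD row (c - 1) 0 else 0) +
      PySem.List.pyGetD row c 0 +
      (if c + 1 < cols then PySem.List.pyGetD row (c + 1) 0 else 0) := by
  have hcols : ((cols.toNat : Nat) : Int) = cols := Int.toNat_of_nonneg (by omega)
  have hc : ((c.toNat : Nat) : Int) = c := Int.toNat_of_nonneg hc0
  rw [pvHrow, ← hcols, ← hc, PySem.List.pyGetD_map_pyRange _ _ _ _ (by omega)]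

theorem pvGet?_map (f : List Int → List Int) (xs : List (List Int)) (i : Int) :
    PySem.List.pyGet? (xs.map f) i = (PySem.List.pyGet? xs i).map f := by
  simp [PySem.List.pyGet?, PySem.List.pyIdx?]

-- looking up one cell of B's table H, for any row index and in-range column
theorem pvHget (grid : List (List Int)) (cols i c : Int) (hc0 : 0 ≤ c) (hc1 : c < cols) :
    PySem.List.pyGetD (PySem.List.pyGetD (grid.map (pvHrow cols)) i []) c 0 =
      (if 0 < c then PySem.List.pyGetD (PySem.List.pyGetD grid i []) (c - 1) 0 else 0) +
      PySem.List.pyGetD (PySem.List.pyGetD grid i []) c 0 +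
      (if c + 1 < cols then PySem.List.pyGetD (PySem.List.pyGetD grid i []) (c + 1) 0 else 0) := by
  unfold PySem.List.pyGetD
  rw [pvGet?_map]
  cases h : PySem.List.pyGet? grid i with
  | none => simp [PySem.List.pyGet?]
  | some row =>
      simp only [Option.map_some, Option.getD_some]
      have := pvHrow_get cols row c hc0 hc1
      unfold PySem.List.pyGetD at this
      exact this

-- ===== VERDICT (by name: the statement is the Claim_ definition above) =====
theorem spotlight_map_spec : Claim_equal_spotlight_map := by
  intro grid _ _
  unfold Spec_spotlight_map
  simp only [spotlight_map, spotlight_map_alt]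
  split_ifs with h
  · rfl
  · apply List.map_congr_left
    intro r hr
    rw [PySem.List.mem_pyRange_one] at hr
    apply List.map_congr_left
    intro c hc
    rw [PySem.List.mem_pyRange_one] at hc
    rw [pvHget grid _ (r - 1) c hc.1 hc.2, pvHget grid _ r c hc.1 hc.2,
        pvHget grid _ (r + 1) c hc.1 hc.2]
    exact pvElem_eq grid _ _ r c hr.1 hr.2 hc.1 hc.2
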